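-- pv_equiv track=rewrite | github.com/strdaniil/genome_evolution | synteny_tools.py | findSimBlocks
-- ===== SOURCE A (Python) =====
-- def findSimBlocks(genome1, genome2):
--     GENOME_SIZE = len(genome1)
--     block_lengths = []
--
--     for i in range(GENOME_SIZE):
--         length = 0
--         longestBlockLength = 0
--
--         while i < GENOME_SIZE and genome1[i] == -1:
--             i += 1
--         if i == GENOME_SIZE:
--             break
--
--         for j in range(GENOME_SIZE):
--             if i < GENOME_SIZE and genome1[i] != -1 and genome1[i] == genome2[j]:
--                 length = 1
--                 while (i + length < GENOME_SIZE and j + length < GENOME_SIZE and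
--                        genome1[i + length] != -1 and genome1[i + length] == genome2[j + length]):
--                     length += 1
--
--                 if length > longestBlockLength:
--                     longestBlockLength = length
--                     startPos = j
--                 j = j + length
--
--         if longestBlockLength > 0:
--             for k in range(longestBlockLength):
--                 genome1[i + k] = -1
--                 genome2[startPos + k] = -1
--             block_lengths.append(longestBlockLength)
--
--     return block_lengths
-- ===== SOURCE B (Python) =====
-- def findSimBlocks(genome1, genome2):
--     # Same greedy block extraction, but each round computes ALL match lengths at once
--     # by a backward dynamic-programming row (suffix longest-common-extension), then
--     # picks the leftmost maximum with max/index; A's per-candidate re-extension while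
--     # loops disappear. Mutates genome1/genome2 in place exactly as A does.
--     n = len(genome1)
--     blocks = []
--     for p in range(n):
--         if genome1[p] == -1:
--             continue
--         # row[j] = length of the common run of genome1[p:] and genome2[j:] stopping
--         # at any -1 in genome1 and at index n; computed bottom-up over i = n-1 .. p,
--         # keeping a single rolling row (memoization of the extension lengths).
--         row = [0] * (n + 1)
--         for i in range(n - 1, p - 1, -1):
--             v = genome1[i]
--             row = [row[j + 1] + 1 if v != -1 and j < n and v == genome2[j] else 0
--                    for j in range(n + 1)]
--         best = max(row[:n])
--         if best > 0:
--             start = row.index(best)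
--             genome1[p:p + best] = [-1] * best
--             genome2[start:start + best] = [-1] * best
--             blocks.append(best)
--     return blocks
-- ===== Notes on version B (the rewrite author's own statement) =====
-- stated objective: alternative
-- what changed: Each greedy round computes ALL candidate match lengths at once with a backward dynamic-programming row (suffix longest-common-extension, one rolling row) and picks the leftmost maximum via max/list.index, replacing A's per-candidate re-extension while loops inside a running-argmax scan; the DP trades A's data-dependent extension cost for a fixed Theta(n^2) per round, so B is not faster.
import Mathlib
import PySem

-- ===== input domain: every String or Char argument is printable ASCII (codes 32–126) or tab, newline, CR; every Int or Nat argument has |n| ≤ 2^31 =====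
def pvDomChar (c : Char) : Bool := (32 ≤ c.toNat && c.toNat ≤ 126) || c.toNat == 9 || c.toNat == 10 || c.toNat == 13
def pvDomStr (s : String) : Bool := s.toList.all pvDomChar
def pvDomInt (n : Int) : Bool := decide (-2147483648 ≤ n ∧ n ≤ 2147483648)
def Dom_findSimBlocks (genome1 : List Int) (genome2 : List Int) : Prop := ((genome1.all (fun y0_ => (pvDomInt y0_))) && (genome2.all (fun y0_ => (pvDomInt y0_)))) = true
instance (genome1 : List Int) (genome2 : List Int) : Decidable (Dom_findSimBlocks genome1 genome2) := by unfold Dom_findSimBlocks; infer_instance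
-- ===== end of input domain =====

-- B replaces A's per-candidate re-extension while loops by one backward dynamic-programming
-- row per greedy round (row[j] = longest common extension of genome1[p:] vs genome2[j:]),
-- then selects the leftmost maximum with max/list.index; same return value. Both Pythons
-- also perform the same in-place masking of genome1/genome2; the ports are functional and
-- the equivalence proved here is about the return value. Indices are nonnegative throughout,
-- so the ports carry them as Nat; every list access is in range on Pre_, so getD is exact
-- there. Loops are ported with an explicit fuel argument, the exact number of remaining
-- iterations.

-- ===== PORT A =====
-- aSkip: `while i < GENOME_SIZE and genome1[i] == -1: i += 1`
-- aExtend: the inner `while` extending a match (starts at length = 1)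
-- aInner: the `for j in range(GENOME_SIZE)` running-argmax scan -> (longestBlockLength, startPos)
-- aMark: `for k in range(L): g[s+k] = -1`
-- aLoop: the outer `for i in range(GENOME_SIZE)` with skip / break / mark / append
def aSkipGo (g1 : List Int) (n : Nat) : Nat → Nat → Nat
  | 0, _ => n
  | fuel + 1, c => if c < n then (if g1.getD c 0 = -1 then aSkipGo g1 n fuel (c + 1) else c) else n

def aSkip (g1 : List Int) (n c : Nat) : Nat := aSkipGo g1 n (n - c) c

def aExtendGo (g1 g2 : List Int) (n i j : Nat) : Nat → Nat → Nat
  | 0, len => len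
  | fuel + 1, len =>
      if i + len < n ∧ j + len < n ∧ g1.getD (i + len) 0 ≠ -1 ∧
         g1.getD (i + len) 0 = g2.getD (j + len) 0 then
        aExtendGo g1 g2 n i j fuel (len + 1)
      else len

def aExtend (g1 g2 : List Int) (n i j len : Nat) : Nat := aExtendGo g1 g2 n i j (n - len) len

def aInner (g1 g2 : List Int) (n i : Nat) : Nat × Nat :=
  (List.range n).foldl (fun acc j =>
    if i < n ∧ g1.getD i 0 ≠ -1 ∧ g1.getD i 0 = g2.getD j 0 then
      let length := aExtend g1 g2 n i j 1
      if acc.1 < length then (length, j) else acc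
    else acc) (0, 0)

def aMark (g : List Int) (s L : Nat) : List Int :=
  (List.range L).foldl (fun g k => g.set (s + k) (-1)) g

def aLoopGo (g1 g2 : List Int) (out : List Int) (n : Nat) : Nat → Nat → List Int
  | 0, _ => out
  | fuel + 1, c =>
      if c < n then
        let p := aSkip g1 n c
        if p = n then out
        else
          let r := aInner g1 g2 n p
          if 0 < r.1 then
            aLoopGo (aMark g1 p r.1) (aMark g2 r.2 r.1) (out ++ [(r.1 : Int)]) n fuel (c + 1)
          else aLoopGo g1 g2 out n fuel (c + 1)
      else out

def aLoop (g1 g2 : List Int) (out : List Int) (n c : Nat) : List Int :=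
  aLoopGo g1 g2 out n (n - c) c

def findSimBlocks (genome1 : List Int) (genome2 : List Int) : List Int :=
  aLoop genome1 genome2 [] genome1.length 0


-- ===== PORT B =====
-- bRowStep: the list comprehension `[row[j+1] + 1 if v != -1 and j < n and v == genome2[j]
--           else 0 for j in range(n + 1)]` (one backward DP step)
-- bRow: `row = [0]*(n+1); for i in range(n-1, p-1, -1): ...` — the fold runs over
--       k = 0 .. n-p-1 with i = n-1-k, i.e. exactly i = n-1 down to p
-- bMark: slice assignment `g[s:s+L] = [-1]*L`
-- bLoop: `for p in range(n)` with continue on masked anchors, max/index selection, mask/append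
def bRowStep (v : Int) (g2 : List Int) (n : Nat) (row : List Nat) : List Nat :=
  (List.range (n + 1)).map (fun j =>
    if v ≠ -1 ∧ j < n ∧ v = g2.getD j 0 then row.getD (j + 1) 0 + 1 else 0)

def bRow (g1 g2 : List Int) (n p : Nat) : List Nat :=
  (List.range (n - p)).foldl (fun row k => bRowStep (g1.getD (n - 1 - k) 0) g2 n row)
    (List.replicate (n + 1) 0)

def bMark (g : List Int) (s L : Nat) : List Int :=
  g.take s ++ List.replicate L (-1) ++ g.drop (s + L)

def bLoopGo (g1 g2 : List Int) (out : List Int) (n : Nat) : Nat → Nat → List Int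
  | 0, _ => out
  | fuel + 1, p =>
      if p < n then
        if g1.getD p 0 = -1 then bLoopGo g1 g2 out n fuel (p + 1)
        else
          let row := bRow g1 g2 n p
          let best := (PySem.List.max? (row.take n) (fun x => x)).getD 0
          if 0 < best then
            let start := (PySem.List.index? row best).getD 0
            bLoopGo (bMark g1 p best) (bMark g2 start best) (out ++ [(best : Int)]) n fuel (p + 1)
          else bLoopGo g1 g2 out n fuel (p + 1)
      else out

def bLoop (g1 g2 out : List Int) (n p : Nat) : List Int := bLoopGo g1 g2 out n (n - p) p

def findSimBlocks_alt (genome1 : List Int) (genome2 : List Int) : List Int :=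
  bLoop genome1 genome2 [] genome1.length 0


-- ===== PRECONDITION & SPEC =====
-- Pre_ excludes exactly the inputs on which A raises IndexError: genome2 shorter than genome1
-- while genome1 contains some unmasked (!= -1) gene, so A's inner scan reads genome2[j] for
-- j up to len(genome1)-1; A returns normally on every other input (B raises there too).
def Pre_findSimBlocks (genome1 : List Int) (genome2 : List Int) : Prop :=
  genome1.length ≤ genome2.length ∨ ∀ x ∈ genome1, x = -1
instance (genome1 : List Int) (genome2 : List Int) : Decidable (Pre_findSimBlocks genome1 genome2) := by
  unfold Pre_findSimBlocks; infer_instance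

def pvWitness_findSimBlocks : List Int × List Int := ([1, 2, 3], [3, 1, 2])

def Spec_findSimBlocks (genome1 : List Int) (genome2 : List Int) (out : List Int) : Prop := out = findSimBlocks_alt genome1 genome2
instance (genome1 : List Int) (genome2 : List Int) (out : List Int) : Decidable (Spec_findSimBlocks genome1 genome2 out) := by unfold Spec_findSimBlocks; infer_instance

-- ===== CLAIM (what is proved, stated in full; the proofs are below) =====
def Claim_equal_findSimBlocks : Prop := ∀ (genome1 : List Int) (genome2 : List Int), Dom_findSimBlocks genome1 genome2 → Pre_findSimBlocks genome1 genome2 → Spec_findSimBlocks genome1 genome2 (findSimBlocks genome1 genome2)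

-- ===== LEMMAS AND PROOFS =====

-- the mathematical longest-common-extension both programs compute: lce i j = length of the
-- common run of g1 from i and g2 from j, stopped at n, at a -1 in g1, or at a mismatch
def lceGo (g1 g2 : List Int) (n : Nat) : Nat → Nat → Nat → Nat
  | 0, _, _ => 0
  | f + 1, i, j =>
      if i < n ∧ j < n ∧ g1.getD i 0 ≠ -1 ∧ g1.getD i 0 = g2.getD j 0 then
        lceGo g1 g2 n f (i + 1) (j + 1) + 1
      else 0

def lce (g1 g2 : List Int) (n i j : Nat) : Nat := lceGo g1 g2 n (n - i) i j

-- the leftmost-strict-max selection both programs perform, as a fold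
def selFold (f : Nat → Nat) (n : Nat) : Nat × Nat :=
  (List.range n).foldl (fun acc j => if acc.1 < f j then (f j, j) else acc) (0, 0)

lemma lceGo_of_le (g1 g2 : List Int) (n : Nat) :
    ∀ f i j, n - i ≤ f → lceGo g1 g2 n f i j = lce g1 g2 n i j := by
  intro f
  induction f with
  | zero =>
      intro i j hf
      unfold lce
      rw [show n - i = 0 from by omega]
  | succ f ih =>
      intro i j hf
      by_cases hi : i < n
      · unfold lce
        rw [show n - i = (n - (i + 1)) + 1 from by omega]
        simp only [lceGo]
        split_ifs with h
        · rw [ih (i + 1) (j + 1) (by omega)]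
          rfl
        · rfl
      · unfold lce
        rw [show n - i = 0 from by omega]
        simp only [lceGo]
        rw [if_neg (by intro h; exact hi h.1)]

lemma lce_unfold (g1 g2 : List Int) (n i j : Nat) :
    lce g1 g2 n i j =
      if i < n ∧ j < n ∧ g1.getD i 0 ≠ -1 ∧ g1.getD i 0 = g2.getD j 0 then
        lce g1 g2 n (i + 1) (j + 1) + 1
      else 0 := by
  by_cases hi : i < n
  · conv_lhs => rw [lce, show n - i = (n - (i + 1)) + 1 from by omega]
    simp only [lceGo]
    split_ifs with h
    · rw [lceGo_of_le g1 g2 n (n - (i + 1)) (i + 1) (j + 1) (Nat.le_refl _)]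
    · rfl
  · conv_lhs => rw [lce, show n - i = 0 from by omega]
    simp only [lceGo]
    rw [if_neg (by intro h; exact hi h.1)]

lemma lce_bounds (g1 g2 : List Int) (n : Nat) :
    ∀ f i j, n - i ≤ f → i ≤ n → j ≤ n →
      i + lce g1 g2 n i j ≤ n ∧ j + lce g1 g2 n i j ≤ n := by
  intro f
  induction f with
  | zero =>
      intro i j hf hi hj
      rw [lce_unfold, if_neg (by intro h; exact absurd h.1 (by omega))]
      omega
  | succ f ih =>
      intro i j hf hi hj
      rw [lce_unfold]
      split_ifs with h
      · have := ih (i + 1) (j + 1) (by omega) (by omega) (by omega)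
        omega
      · omega

-- A's extension while-loop counts exactly lce from the current offset
lemma aExtendGo_eq_lce (g1 g2 : List Int) (n i j : Nat) :
    ∀ f len, aExtendGo g1 g2 n i j f len = len + lceGo g1 g2 n f (i + len) (j + len) := by
  intro f
  induction f with
  | zero => intro len; simp [aExtendGo, lceGo]
  | succ f ih =>
      intro len
      simp only [aExtendGo, lceGo]
      split_ifs with h
      · rw [ih (len + 1), show i + (len + 1) = i + len + 1 from by omega,
          show j + (len + 1) = j + len + 1 from by omega]
        omega
      · omega

lemma aExtend_one_eq_lce (g1 g2 : List Int) (n i j : Nat) (hi : i < n) (hj : j < n)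
    (hv : g1.getD i 0 ≠ -1) (he : g1.getD i 0 = g2.getD j 0) :
    aExtend g1 g2 n i j 1 = lce g1 g2 n i j := by
  unfold aExtend
  rw [aExtendGo_eq_lce, lceGo_of_le g1 g2 n (n - 1) (i + 1) (j + 1) (by omega)]
  rw [lce_unfold g1 g2 n i j, if_pos ⟨hi, hj, hv, he⟩]
  omega

-- A's inner scan is the leftmost-strict-max fold of lce over range n
lemma aInner_eq_selFold (g1 g2 : List Int) (n p : Nat) (hp : p < n) (hv : g1.getD p 0 ≠ -1) :
    aInner g1 g2 n p = selFold (fun j => lce g1 g2 n p j) n := by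
  unfold aInner selFold
  apply PySem.List.foldl_congr_mem
  intro acc j hj
  rw [List.mem_range] at hj
  by_cases hg : g1.getD p 0 = g2.getD j 0
  · rw [if_pos ⟨hp, hv, hg⟩]
    simp only [aExtend_one_eq_lce g1 g2 n p j hp hj hv hg]
  · rw [if_neg (by intro h; exact hg h.2.2)]
    show acc = if acc.1 < lce g1 g2 n p j then (lce g1 g2 n p j, j) else acc
    have h0 : lce g1 g2 n p j = 0 := by
      rw [lce_unfold, if_neg (by intro h; exact hg h.2.2.2)]
    rw [h0, if_neg (by omega)]

-- characterisation of the leftmost-strict-max fold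
lemma selFold_max (f : Nat → Nat) : ∀ n j, j < n → f j ≤ (selFold f n).1 := by
  intro n
  induction n with
  | zero => intro j hj; omega
  | succ n ih =>
      intro j hj
      unfold selFold at *
      rw [List.range_succ, List.foldl_append, List.foldl_cons, List.foldl_nil]
      split_ifs with h
      · rcases Nat.lt_succ_iff_lt_or_eq.mp hj with hj' | rfl
        · exact le_of_lt (lt_of_le_of_lt (ih j hj') h)
        · exact Nat.le_refl _
      · rcases Nat.lt_succ_iff_lt_or_eq.mp hj with hj' | rfl
        · exact ih j hj'
        · omega

lemma selFold_sel (f : Nat → Nat) : ∀ n, 0 < (selFold f n).1 →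
    (selFold f n).2 < n ∧ f (selFold f n).2 = (selFold f n).1 ∧
      ∀ t, t < (selFold f n).2 → f t < (selFold f n).1 := by
  intro n
  induction n with
  | zero => intro h; simp [selFold] at h
  | succ n ih =>
      have hmax := selFold_max f n
      unfold selFold at *
      rw [List.range_succ, List.foldl_append, List.foldl_cons, List.foldl_nil]
      split_ifs with h
      · intro _
        exact ⟨Nat.lt_succ_self n, rfl,
          fun t ht => lt_of_le_of_lt (hmax t ht) h⟩
      · intro hpos
        obtain ⟨h1, h2, h3⟩ := ih hpos
        exact ⟨by omega, h2, h3⟩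

-- B's DP row computes lce
lemma bRow_of_ge (g1 g2 : List Int) (n p : Nat) (h : n ≤ p) :
    bRow g1 g2 n p = List.replicate (n + 1) 0 := by
  unfold bRow
  rw [show n - p = 0 from by omega]
  rfl

lemma bRow_of_lt (g1 g2 : List Int) (n p : Nat) (h : p < n) :
    bRow g1 g2 n p = bRowStep (g1.getD p 0) g2 n (bRow g1 g2 n (p + 1)) := by
  unfold bRow
  rw [show n - p = (n - (p + 1)) + 1 from by omega, List.range_succ, List.foldl_append,
    List.foldl_cons, List.foldl_nil, show n - 1 - (n - (p + 1)) = p from by omega]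

lemma bRowStep_getD (v : Int) (g2 : List Int) (n : Nat) (row : List Nat) (j : Nat)
    (hj : j ≤ n) :
    (bRowStep v g2 n row).getD j 0 =
      if v ≠ -1 ∧ j < n ∧ v = g2.getD j 0 then row.getD (j + 1) 0 + 1 else 0 := by
  unfold bRowStep
  rw [List.getD_eq_getElem?_getD, List.getElem?_map, List.getElem?_range (by omega)]
  rfl

lemma bRowStep_length (v : Int) (g2 : List Int) (n : Nat) (row : List Nat) :
    (bRowStep v g2 n row).length = n + 1 := by
  unfold bRowStep
  rw [List.length_map, List.length_range]

lemma bRow_length (g1 g2 : List Int) (n p : Nat) : (bRow g1 g2 n p).length = n + 1 := by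
  by_cases h : p < n
  · rw [bRow_of_lt g1 g2 n p h, bRowStep_length]
  · rw [bRow_of_ge g1 g2 n p (by omega), List.length_replicate]

lemma bRow_getD (g1 g2 : List Int) (n : Nat) :
    ∀ k p, n - p ≤ k → ∀ j, j ≤ n → (bRow g1 g2 n p).getD j 0 = lce g1 g2 n p j := by
  intro k
  induction k with
  | zero =>
      intro p hk j hj
      rw [bRow_of_ge g1 g2 n p (by omega), lce_unfold, if_neg (by intro h; omega)]
      rw [List.getD_eq_getElem?_getD, List.getElem?_replicate]
      split <;> simp
  | succ k ih =>
      intro p hk j hj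
      by_cases hp : p < n
      · rw [bRow_of_lt g1 g2 n p hp, bRowStep_getD _ _ _ _ _ hj, lce_unfold]
        by_cases hc : g1.getD p 0 ≠ -1 ∧ j < n ∧ g1.getD p 0 = g2.getD j 0
        · rw [if_pos hc, if_pos ⟨hp, hc.2.1, hc.1, hc.2.2⟩,
            ih (p + 1) (by omega) (j + 1) (by omega)]
        · rw [if_neg hc, if_neg (by intro h; exact hc ⟨h.2.2.1, h.2.1, h.2.2.2⟩)]
      · rw [bRow_of_ge g1 g2 n p (by omega), lce_unfold, if_neg (by intro h; omega)]
        rw [List.getD_eq_getElem?_getD, List.getElem?_replicate]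
        split <;> simp

lemma bRow_take (g1 g2 : List Int) (n p : Nat) :
    (bRow g1 g2 n p).take n = (List.range n).map (fun j => lce g1 g2 n p j) := by
  apply List.ext_getElem
  · rw [List.length_take, bRow_length, List.length_map, List.length_range]
    omega
  · intro t h1 h2
    rw [List.length_take, bRow_length] at h1
    have ht : t < n := by omega
    rw [List.getElem_take, List.getElem_map, List.getElem_range]
    have := bRow_getD g1 g2 n (n - p) p (Nat.le_refl _) t (by omega)
    rw [List.getD_eq_getElem?_getD, List.getElem?_eq_getElem (by rw [bRow_length]; omega)] at this
    simpa using this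

-- max(row[:n]) is the fold's maximum value
lemma max_take_eq (g1 g2 : List Int) (n p : Nat) (hp : p < n) :
    (PySem.List.max? ((bRow g1 g2 n p).take n) (fun x => x)).getD 0 =
      (selFold (fun j => lce g1 g2 n p j) n).1 := by
  rw [bRow_take g1 g2 n p]
  set f := fun j => lce g1 g2 n p j with hf
  set l := (List.range n).map f with hl
  have hne : l ≠ [] := by
    rw [hl]
    simp only [ne_eq, List.map_eq_nil_iff, List.range_eq_nil]
    omega
  match hm : PySem.List.max? l (fun x => x) with
  | none => exact absurd ((PySem.List.max?_eq_none_iff l (fun x => x)).mp hm) hne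
  | some m =>
      have hmem : m ∈ l := PySem.List.max?_mem hm
      have hmax : ∀ y ∈ l, y ≤ m := by
        intro y hy
        exact PySem.List.max?_isMax hm y hy
      obtain ⟨j, hjmem, hjm⟩ := List.mem_map.mp hmem
      rw [List.mem_range] at hjmem
      simp only [Option.getD_some]
      by_cases hz : 0 < (selFold f n).1
      · obtain ⟨h1, h2, _⟩ := selFold_sel f n hz
        have hle1 : (selFold f n).1 ≤ m := by
          rw [← h2]
          exact hmax (f (selFold f n).2) (List.mem_map.mpr ⟨(selFold f n).2, List.mem_range.mpr h1, rfl⟩)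
        have hle2 : m ≤ (selFold f n).1 := by
          rw [← hjm]
          exact selFold_max f n j hjmem
        omega
      · have : f j ≤ (selFold f n).1 := selFold_max f n j hjmem
        omega

-- first-occurrence characterisation of list.index
lemma index?_of_first (l : List Nat) (v : Nat) :
    ∀ i, i < l.length → l.getD i 0 = v → (∀ t, t < i → l.getD t 0 ≠ v) →
      PySem.List.index? l v = some i := by
  induction l with
  | nil => intro i hi; simp at hi
  | cons x xs ih =>
      intro i hi hv hfirst
      cases i with
      | zero =>
          rw [List.getD_cons_zero] at hv
          rw [hv, PySem.List.index?_cons_self]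
      | succ i =>
          have hx : x ≠ v := by
            have := hfirst 0 (by omega)
            rwa [List.getD_cons_zero] at this
          rw [PySem.List.index?_cons_of_ne xs hx]
          rw [ih i (by simpa using hi) (by rwa [List.getD_cons_succ] at hv)
            (fun t ht => by
              have := hfirst (t + 1) (by omega)
              rwa [List.getD_cons_succ] at this)]
          rfl

-- one greedy round: A's scan and B's max/index pick the same (length, start)
lemma roundSel_eq (g1 g2 : List Int) (n p : Nat) (hp : p < n) (hv : g1.getD p 0 ≠ -1) :
    (aInner g1 g2 n p).1 =
        (PySem.List.max? ((bRow g1 g2 n p).take n) (fun x => x)).getD 0 ∧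
      (0 < (aInner g1 g2 n p).1 →
        (aInner g1 g2 n p).2 =
          (PySem.List.index? (bRow g1 g2 n p)
            ((PySem.List.max? ((bRow g1 g2 n p).take n) (fun x => x)).getD 0)).getD 0) := by
  set f := fun j => lce g1 g2 n p j with hf
  rw [aInner_eq_selFold g1 g2 n p hp hv, max_take_eq g1 g2 n p hp]
  refine ⟨rfl, ?_⟩
  intro hpos
  obtain ⟨h1, h2, h3⟩ := selFold_sel f n hpos
  rw [index?_of_first (bRow g1 g2 n p) (selFold f n).1 (selFold f n).2
    (by rw [bRow_length]; omega)
    (by rw [bRow_getD g1 g2 n (n - p) p (Nat.le_refl _) _ (by omega)]; exact h2)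
    (fun t ht => by
      rw [bRow_getD g1 g2 n (n - p) p (Nat.le_refl _) t (by omega)]
      have := h3 t ht
      have hft : f t = lce g1 g2 n p t := rfl
      omega)]
  rfl

lemma roundSel_bounds (g1 g2 : List Int) (n p : Nat) (hp : p < n) (hv : g1.getD p 0 ≠ -1)
    (hpos : 0 < (aInner g1 g2 n p).1) :
    p + (aInner g1 g2 n p).1 ≤ n ∧ (aInner g1 g2 n p).2 + (aInner g1 g2 n p).1 ≤ n := by
  rw [aInner_eq_selFold g1 g2 n p hp hv] at *
  set f := fun j => lce g1 g2 n p j with hf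
  obtain ⟨h1, h2, _⟩ := selFold_sel f n hpos
  have hb := lce_bounds g1 g2 n (n - p) p (selFold f n).2 (Nat.le_refl _)
  have : f (selFold f n).2 = lce g1 g2 n p (selFold f n).2 := rfl
  omega

-- set/getD bookkeeping for A's masking loop
lemma getD_set (l : List Int) (i t : Nat) (a d : Int) :
    (l.set i a).getD t d = if i = t ∧ i < l.length then a else l.getD t d := by
  simp only [List.getD_eq_getElem?_getD, List.getElem?_set]
  by_cases h1 : i = t
  · subst h1
    by_cases h2 : i < l.length
    · simp [h2]
    · simp [h2]
  · simp [h1]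

-- aSkip unfolding equations (fuel = n - c is the canonical invariant)
lemma aSkip_ge_n (g1 : List Int) (n c : Nat) (hc : ¬ c < n) : aSkip g1 n c = n := by
  unfold aSkip
  rw [show n - c = 0 from by omega]
  rfl

lemma aSkip_unfold_neg (g1 : List Int) (n c : Nat) (hc : c < n) (hval : g1.getD c 0 = -1) :
    aSkip g1 n c = aSkip g1 n (c + 1) := by
  unfold aSkip
  rw [show n - c = (n - (c + 1)) + 1 from by omega]
  simp only [aSkipGo]
  rw [if_pos hc, if_pos hval]

lemma aSkip_unfold_pos (g1 : List Int) (n c : Nat) (hc : c < n) (hval : ¬ g1.getD c 0 = -1) :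
    aSkip g1 n c = c := by
  unfold aSkip
  rw [show n - c = (n - (c + 1)) + 1 from by omega]
  simp only [aSkipGo]
  rw [if_pos hc, if_neg hval]

lemma aSkip_ge (g1 : List Int) (n : Nat) : ∀ c, c ≤ n → c ≤ aSkip g1 n c := by
  have H : ∀ k c, n - c ≤ k → c ≤ n → c ≤ aSkip g1 n c := by
    intro k
    induction k with
    | zero => intro c hk hc; rw [aSkip_ge_n g1 n c (by omega)]; omega
    | succ k ih =>
        intro c hk hc
        by_cases hlt : c < n
        · by_cases hval : g1.getD c 0 = -1
          · rw [aSkip_unfold_neg g1 n c hlt hval]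
            have := ih (c + 1) (by omega) (by omega)
            omega
          · rw [aSkip_unfold_pos g1 n c hlt hval]
        · rw [aSkip_ge_n g1 n c hlt]; omega
  exact fun c hc => H (n - c) c (Nat.le_refl _) hc

lemma aSkip_le (g1 : List Int) (n : Nat) : ∀ c, aSkip g1 n c ≤ n := by
  have H : ∀ k c, n - c ≤ k → aSkip g1 n c ≤ n := by
    intro k
    induction k with
    | zero => intro c hk; rw [aSkip_ge_n g1 n c (by omega)]
    | succ k ih =>
        intro c hk
        by_cases hlt : c < n
        · by_cases hval : g1.getD c 0 = -1
          · rw [aSkip_unfold_neg g1 n c hlt hval]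
            exact ih (c + 1) (by omega)
          · rw [aSkip_unfold_pos g1 n c hlt hval]; omega
        · rw [aSkip_ge_n g1 n c hlt]
  exact fun c => H (n - c) c (Nat.le_refl _)

lemma aSkip_between (g1 : List Int) (n : Nat) :
    ∀ c k, c ≤ k → k < aSkip g1 n c → g1.getD k 0 = -1 := by
  have H : ∀ f c, n - c ≤ f → ∀ k, c ≤ k → k < aSkip g1 n c → g1.getD k 0 = -1 := by
    intro f
    induction f with
    | zero =>
        intro c hf k h1 h2
        rw [aSkip_ge_n g1 n c (by omega)] at h2
        omega
    | succ f ih =>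
        intro c hf k h1 h2
        by_cases hlt : c < n
        · by_cases hval : g1.getD c 0 = -1
          · rw [aSkip_unfold_neg g1 n c hlt hval] at h2
            rcases Nat.eq_or_lt_of_le h1 with rfl | h
            · exact hval
            · exact ih (c + 1) (by omega) k h h2
          · rw [aSkip_unfold_pos g1 n c hlt hval] at h2
            omega
        · rw [aSkip_ge_n g1 n c hlt] at h2
          have := aSkip_le g1 n c
          omega
  exact fun c => H (n - c) c (Nat.le_refl _)

lemma aSkip_all (g1 : List Int) (n : Nat) :
    ∀ c, (∀ k, c ≤ k → k < n → g1.getD k 0 = -1) → aSkip g1 n c = n := by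
  have H : ∀ f c, n - c ≤ f → (∀ k, c ≤ k → k < n → g1.getD k 0 = -1) → aSkip g1 n c = n := by
    intro f
    induction f with
    | zero => intro c hf _; exact aSkip_ge_n g1 n c (by omega)
    | succ f ih =>
        intro c hf h
        by_cases hlt : c < n
        · rw [aSkip_unfold_neg g1 n c hlt (h c (Nat.le_refl c) hlt)]
          exact ih (c + 1) (by omega) (fun k h1 h2 => h k (by omega) h2)
        · exact aSkip_ge_n g1 n c hlt
  exact fun c h => H (n - c) c (Nat.le_refl _) h

-- aMark structure and its agreement with B's slice assignment
lemma aMark_zero (g : List Int) (s : Nat) : aMark g s 0 = g := rfl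

lemma aMark_succ (g : List Int) (s L : Nat) :
    aMark g s (L + 1) = (aMark g s L).set (s + L) (-1) := by
  simp [aMark, List.range_succ]

lemma aMark_length (g : List Int) (s L : Nat) : (aMark g s L).length = g.length := by
  induction L with
  | zero => rfl
  | succ L ih => rw [aMark_succ, List.length_set, ih]

lemma aMark_getD (g : List Int) (s L t : Nat) :
    (aMark g s L).getD t 0 =
      if s ≤ t ∧ t < s + L ∧ t < g.length then -1 else g.getD t 0 := by
  induction L with
  | zero => rw [aMark_zero]; rw [if_neg (by omega)]
  | succ L ih =>
      rw [aMark_succ, getD_set, aMark_length, ih]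
      split_ifs <;> first | rfl | omega

lemma bMark_eq (g : List Int) (s : Nat) :
    ∀ L, s + L ≤ g.length → bMark g s L = aMark g s L := by
  intro L
  induction L with
  | zero =>
      intro _
      simp [bMark, aMark_zero]
  | succ L ih =>
      intro h
      rw [aMark_succ, ← ih (by omega)]
      unfold bMark
      rw [List.append_assoc, List.append_assoc, List.set_append, List.set_append]
      have hts : (g.take s).length = s := by
        rw [List.length_take]; omega
      rw [if_neg (by omega), hts]
      have hrl : (List.replicate L (-1 : Int)).length = L := List.length_replicate
      rw [if_neg (by omega), hrl]
      rw [List.drop_eq_getElem_cons (show s + L < g.length by omega)]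
      simp [List.replicate_succ']
      rw [List.drop_eq_getElem_cons (show s + L < g.length by omega), List.set_cons_zero,
        Nat.add_assoc]

-- loop unfolding equations
lemma aLoop_lt (g1 g2 out : List Int) (n c : Nat) (hc : c < n) :
    aLoop g1 g2 out n c =
      (let p := aSkip g1 n c
       if p = n then out
       else
         let r := aInner g1 g2 n p
         if 0 < r.1 then
           aLoop (aMark g1 p r.1) (aMark g2 r.2 r.1) (out ++ [(r.1 : Int)]) n (c + 1)
         else aLoop g1 g2 out n (c + 1)) := by
  unfold aLoop
  rw [show n - c = (n - (c + 1)) + 1 from by omega]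
  simp only [aLoopGo]
  rw [if_pos hc]

lemma aLoop_ge (g1 g2 out : List Int) (n c : Nat) (hc : ¬ c < n) :
    aLoop g1 g2 out n c = out := by
  unfold aLoop
  rw [show n - c = 0 from by omega]
  rfl

lemma bLoop_lt (g1 g2 out : List Int) (n c : Nat) (hc : c < n) :
    bLoop g1 g2 out n c =
      (if g1.getD c 0 = -1 then bLoop g1 g2 out n (c + 1)
       else
         let row := bRow g1 g2 n c
         let best := (PySem.List.max? (row.take n) (fun x => x)).getD 0
         if 0 < best then
           let start := (PySem.List.index? row best).getD 0
           bLoop (bMark g1 c best) (bMark g2 start best) (out ++ [(best : Int)]) n (c + 1)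
         else bLoop g1 g2 out n (c + 1)) := by
  unfold bLoop
  rw [show n - c = (n - (c + 1)) + 1 from by omega]
  simp only [bLoopGo]
  rw [if_pos hc]

lemma bLoop_ge (g1 g2 out : List Int) (n c : Nat) (hc : ¬ c < n) :
    bLoop g1 g2 out n c = out := by
  unfold bLoop
  rw [show n - c = 0 from by omega]
  rfl

-- A's outer iteration at an already-masked position is a no-op
lemma aLoop_adv (n : Nat) :
    ∀ k c g1 g2 out, n - c ≤ k → n ≤ g1.length → c < n → g1.getD c 0 = -1 →
      aLoop g1 g2 out n c = aLoop g1 g2 out n (c + 1) := by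
  intro k
  induction k with
  | zero => intro c _ _ _ hk _ hc _; omega
  | succ k ih =>
      intro c g1 g2 out hk hlen hc hval
      rw [aLoop_lt g1 g2 out n c hc]
      simp only [aSkip_unfold_neg g1 n c hc hval]
      by_cases hcn : c + 1 < n
      · by_cases hp : aSkip g1 n (c + 1) = n
        · rw [if_pos hp]
          rw [aLoop_lt g1 g2 out n (c + 1) hcn, if_pos hp]
        · have hple : c + 1 ≤ aSkip g1 n (c + 1) := aSkip_ge g1 n (c + 1) (by omega)
          have hpn : aSkip g1 n (c + 1) < n :=
            Nat.lt_of_le_of_ne (aSkip_le g1 n (c + 1)) hp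
          rw [if_neg hp]
          by_cases hr : 0 < (aInner g1 g2 n (aSkip g1 n (c + 1))).1
          · simp only [if_pos hr]
            conv => rhs; rw [aLoop_lt g1 g2 out n (c + 1) hcn]
            simp only []
            rw [if_neg hp, if_pos hr]
            apply ih (c + 1) _ _ _ (by omega) (by rw [aMark_length]; exact hlen) hcn
            rw [aMark_getD]
            by_cases hpe : aSkip g1 n (c + 1) = c + 1
            · rw [if_pos ⟨by omega, by omega, by omega⟩]
            · rw [if_neg (by intro h; omega)]
              exact aSkip_between g1 n (c + 1) (c + 1) (Nat.le_refl _) (by omega)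
          · rw [if_neg hr]
      · have hsn : aSkip g1 n (c + 1) = n := aSkip_ge_n g1 n (c + 1) hcn
        rw [if_pos hsn]
        rw [aLoop_ge g1 g2 out n (c + 1) hcn]

-- B's loop over a fully masked tail appends nothing
lemma bLoop_none (g2 out : List Int) (n : Nat) :
    ∀ k c g1, n - c ≤ k → (∀ j, c ≤ j → j < n → g1.getD j 0 = -1) →
      bLoop g1 g2 out n c = out := by
  intro k
  induction k with
  | zero => intro c g1 hk h; rw [bLoop_ge _ _ _ _ _ (by omega)]
  | succ k ih =>
      intro c g1 hk h
      by_cases hc : c < n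
      · rw [bLoop_lt _ _ _ _ _ hc, if_pos (h c (Nat.le_refl c) hc)]
        exact ih (c + 1) g1 (by omega) (fun j h1 h2 => h j (by omega) h2)
      · rw [bLoop_ge _ _ _ _ _ hc]

lemma loop_eq (n : Nat) :
    ∀ k c g1 g2 out, n - c ≤ k → g1.length = n → n ≤ g2.length →
      aLoop g1 g2 out n c = bLoop g1 g2 out n c := by
  intro k
  induction k with
  | zero =>
      intro c g1 g2 out hk h1 h2
      rw [aLoop_ge _ _ _ _ _ (by omega), bLoop_ge _ _ _ _ _ (by omega)]
  | succ k ih =>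
      intro c g1 g2 out hk h1 h2
      by_cases hc : c < n
      · by_cases hval : g1.getD c 0 = -1
        · rw [aLoop_adv n (k + 1) c g1 g2 out (by omega) (by omega) hc hval]
          rw [bLoop_lt g1 g2 out n c hc, if_pos hval]
          exact ih (c + 1) g1 g2 out (by omega) h1 h2
        · have hskip : aSkip g1 n c = c := aSkip_unfold_pos g1 n c hc hval
          obtain ⟨hbest, hstart⟩ := roundSel_eq g1 g2 n c hc hval
          rw [aLoop_lt g1 g2 out n c hc]
          simp only [hskip]
          rw [if_neg (by omega : ¬ c = n)]
          rw [bLoop_lt g1 g2 out n c hc, if_neg hval]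
          simp only [← hbest]
          by_cases hr : 0 < (aInner g1 g2 n c).1
          · rw [if_pos hr, if_pos hr]
            have hb := roundSel_bounds g1 g2 n c hc hval hr
            rw [← hbest] at hstart
            rw [← hstart hr,
              bMark_eq g1 c _ (by omega), bMark_eq g2 _ _ (by omega)]
            exact ih (c + 1) _ _ _ (by omega) (by rw [aMark_length]; exact h1)
              (by rw [aMark_length]; exact h2)
          · rw [if_neg hr, if_neg hr]
            exact ih (c + 1) _ _ _ (by omega) h1 h2
      · rw [aLoop_ge _ _ _ _ _ hc, bLoop_ge _ _ _ _ _ hc]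

lemma main_eq (genome1 genome2 : List Int)
    (hpre : genome1.length ≤ genome2.length ∨ ∀ x ∈ genome1, x = -1) :
    findSimBlocks genome1 genome2 = findSimBlocks_alt genome1 genome2 := by
  unfold findSimBlocks findSimBlocks_alt
  rcases hpre with hle | hall
  · exact loop_eq genome1.length (genome1.length) 0 genome1 genome2 [] (by omega) rfl hle
  · have hg : ∀ j, 0 ≤ j → j < genome1.length → genome1.getD j 0 = -1 := by
      intro j _ hj
      rw [List.getD_eq_getElem?_getD, List.getElem?_eq_getElem hj]
      exact hall _ (List.getElem_mem hj)
    rw [bLoop_none genome2 [] genome1.length genome1.length 0 genome1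
      (by omega) (fun j h1 h2 => hg j h1 h2)]
    by_cases h0 : 0 < genome1.length
    · rw [aLoop_lt genome1 genome2 [] genome1.length 0 h0,
        aSkip_all genome1 genome1.length 0 (fun j h1 h2 => hg j h1 h2), if_pos rfl]
    · rw [aLoop_ge genome1 genome2 [] genome1.length 0 h0]

-- ===== VERDICT (by name: the statement is the Claim_ definition above) =====
theorem findSimBlocks_spec : Claim_equal_findSimBlocks := by
  intro genome1 genome2 _ hpre
  unfold Pre_findSimBlocks at hpre
  unfold Spec_findSimBlocks
  exact main_eq genome1 genome2 hpre
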